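-- pv_equiv track=rewrite | github.com/5k41/truekicker | truekicker.py | separate_timeline
-- ===== SOURCE A (Python) =====
-- def separate_timeline(timeline, oldtimelines):
--     """ Returns one timeline from a list of timelines """
--     timelines = list()
--     count = 0
--     for i in range(len(oldtimelines)):
--         add = len(oldtimelines[i][1])
--         timelines += [[oldtimelines[i][0], timeline[1][count:count+add]]]
--         count += add
--     return timelines
-- ===== SOURCE B (Python) =====
-- def separate_timeline(timeline, oldtimelines):
--     """ Returns one timeline from a list of timelines """
--     if not oldtimelines:
--         return []
--     head, rest = oldtimelines[0], oldtimelines[1:]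
--     k = len(head[1])
--     return [[head[0], timeline[1][:k]]] + separate_timeline(
--         (timeline[0], timeline[1][k:]), rest)
-- ===== Notes on version B (the rewrite author's own statement) =====
-- stated objective: alternative
-- what changed: Replaces the offset-tracking loop (a running count slicing a fixed list) by a consume-and-recurse decomposition: each step peels the head segment off the FRONT of the remaining data and recurses on the shrunken data, so no offsets or counters exist.
import Mathlib
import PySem

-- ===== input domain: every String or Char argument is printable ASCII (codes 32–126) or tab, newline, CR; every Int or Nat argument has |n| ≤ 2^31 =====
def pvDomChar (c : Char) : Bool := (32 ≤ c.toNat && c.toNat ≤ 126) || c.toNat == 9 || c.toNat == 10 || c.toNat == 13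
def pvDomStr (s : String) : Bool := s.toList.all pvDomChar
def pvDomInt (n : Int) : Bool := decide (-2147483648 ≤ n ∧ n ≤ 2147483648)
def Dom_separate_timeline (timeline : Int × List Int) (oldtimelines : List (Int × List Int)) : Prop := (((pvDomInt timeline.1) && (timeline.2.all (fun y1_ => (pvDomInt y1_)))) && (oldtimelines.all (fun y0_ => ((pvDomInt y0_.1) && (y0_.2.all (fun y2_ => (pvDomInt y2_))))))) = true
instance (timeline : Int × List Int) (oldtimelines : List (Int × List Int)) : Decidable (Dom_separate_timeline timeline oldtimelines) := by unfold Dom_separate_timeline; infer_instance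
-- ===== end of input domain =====

-- B replaces A's offset-tracking loop (running count slicing a fixed list) by a consume-and-recurse decomposition that peels each segment off the front of the remaining data (alternative, same cost).


-- ===== PORT A =====
-- A's for-loop over range(len(oldtimelines)) threading (timelines, count); the index i is always
-- in range, so the index loop is transcribed as structural recursion over the same elements.
def aLoop (ts : List Int) (old : List (Int × List Int)) (acc : List (Int × List Int)) (count : Int) : List (Int × List Int) :=
  match old with
  | [] => acc
  | o :: rest =>
      aLoop ts rest (acc ++ [(o.1, PySem.List.slice ts (some count) (some (count + o.2.length)))]) (count + o.2.length)

def separate_timeline (timeline : Int × List Int) (oldtimelines : List (Int × List Int)) : List (Int × List Int) :=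
  aLoop timeline.2 oldtimelines [] 0

-- ===== PORT B =====
-- B's recursion: peel the head segment off the FRONT of the data and recurse on the rest.
-- data[:k] / data[k:] with k = len ≥ 0 are exactly List.take k / List.drop k.
def separate_timeline_alt (timeline : Int × List Int) (oldtimelines : List (Int × List Int)) : List (Int × List Int) :=
  match oldtimelines with
  | [] => []
  | head :: rest =>
      let k := head.2.length
      [(head.1, timeline.2.take k)] ++ separate_timeline_alt (timeline.1, timeline.2.drop k) rest

-- ===== PRECONDITION & SPEC =====
def Spec_separate_timeline (timeline : Int × List Int) (oldtimelines : List (Int × List Int)) (out : List (Int × List Int)) : Prop := out = separate_timeline_alt timeline oldtimelines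
instance (timeline : Int × List Int) (oldtimelines : List (Int × List Int)) (out : List (Int × List Int)) : Decidable (Spec_separate_timeline timeline oldtimelines out) := by unfold Spec_separate_timeline; infer_instance

-- ===== CLAIM (what is proved, stated in full; the proofs are below) =====
def Claim_equal_separate_timeline : Prop := ∀ (timeline : Int × List Int) (oldtimelines : List (Int × List Int)), Dom_separate_timeline timeline oldtimelines → Spec_separate_timeline timeline oldtimelines (separate_timeline timeline oldtimelines)

-- ===== LEMMAS AND PROOFS =====
theorem aLoop_append (ts : List Int) (old : List (Int × List Int)) (acc : List (Int × List Int)) (c : Int) :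
    aLoop ts old acc c = acc ++ aLoop ts old [] c := by
  induction old generalizing acc c with
  | nil => simp [aLoop]
  | cons o rest ih =>
      simp only [aLoop]
      rw [ih]
      conv_rhs => rw [ih]
      simp

theorem aLoop_eq_b (x : Int) (ts : List Int) (old : List (Int × List Int)) (j : ℕ) :
    aLoop ts old [] (j : Int) = separate_timeline_alt (x, ts.drop j) old := by
  induction old generalizing j with
  | nil => simp [aLoop, separate_timeline_alt]
  | cons o rest ih =>
      simp only [aLoop, separate_timeline_alt]
      rw [aLoop_append]
      have hcast : (j : Int) + (o.2.length : Int) = ((j + o.2.length : ℕ) : Int) := by push_cast; ring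
      rw [hcast, ih (j + o.2.length), PySem.List.slice_natCast]
      simp [List.drop_drop]

-- ===== VERDICT (by name: the statement is the Claim_ definition above) =====
theorem separate_timeline_spec : Claim_equal_separate_timeline := by
  intro timeline oldtimelines _
  unfold Spec_separate_timeline separate_timeline
  have := aLoop_eq_b timeline.1 timeline.2 oldtimelines 0
  simpa using this
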